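-- pv_equiv track=rewrite | github.com/langflow-ai/langflow | src/backend/base/langflow/api/v1/base.py | fix_variable
-- ===== SOURCE A (Python) =====
-- INVALID_CHARACTERS = {
--     " ",
--     ",",
--     ".",
--     ":",
--     ";",
--     "!",
--     "?",
--     "/",
--     "\\",
--     "(",
--     ")",
--     "[",
--     "]",
-- }
--
-- def fix_variable(var, invalid_chars, wrong_variables):
--     if not var:
--         return var, invalid_chars, wrong_variables
--     new_var = var
--
--     # Handle variables starting with a number
--     if var[0].isdigit():
--         invalid_chars.append(var[0])
--         new_var, invalid_chars, wrong_variables = fix_variable(var[1:], invalid_chars, wrong_variables)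
--
--     # Temporarily replace {{ and }} to avoid treating them as invalid
--     new_var = new_var.replace("{{", "ᴛᴇᴍᴘᴏᴘᴇɴ").replace("}}", "ᴛᴇᴍᴘᴄʟᴏsᴇ")
--
--     # Remove invalid characters
--     for char in new_var:
--         if char in INVALID_CHARACTERS:
--             invalid_chars.append(char)
--             new_var = new_var.replace(char, "")
--             if var not in wrong_variables:  # Avoid duplicating entries
--                 wrong_variables.append(var)
--
--     # Restore {{ and }}
--     new_var = new_var.replace("ᴛᴇᴍᴘᴏᴘᴇɴ", "{{").replace("ᴛᴇᴍᴘᴄʟᴏsᴇ", "}}")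
--
--     return new_var, invalid_chars, wrong_variables
-- ===== SOURCE B (Python) =====
-- INVALID_CHARACTERS = {
--     " ",
--     ",",
--     ".",
--     ":",
--     ";",
--     "!",
--     "?",
--     "/",
--     "\\",
--     "(",
--     ")",
--     "[",
--     "]",
-- }
--
-- def fix_variable(var, invalid_chars, wrong_variables):
--     if not var:
--         return var, invalid_chars, wrong_variables
--
--     # Iteratively peel leading digits (left to right), recording each
--     while var and var[0].isdigit():
--         invalid_chars.append(var[0])
--         var = var[1:]
--
--     # Temporarily replace {{ and }} to avoid treating them as invalid
--     new_var = var.replace("{{", "ᴛᴇᴍᴘᴏᴘᴇɴ").replace("}}", "ᴛᴇᴍᴘᴄʟᴏsᴇ")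
--
--     # Remove invalid characters
--     for char in new_var:
--         if char in INVALID_CHARACTERS:
--             invalid_chars.append(char)
--             new_var = new_var.replace(char, "")
--             if var not in wrong_variables:  # Avoid duplicating entries
--                 wrong_variables.append(var)
--
--     # Restore {{ and }}
--     new_var = new_var.replace("ᴛᴇᴍᴘᴏᴘᴇɴ", "{{").replace("ᴛᴇᴍᴘᴄʟᴏsᴇ", "}}")
--
--     return new_var, invalid_chars, wrong_variables
-- ===== Notes on version B (the rewrite author's own statement) =====
-- stated objective: simpler
-- what changed: A strips leading digits by recursion, re-running the whole brace-dance/invalid-char body once per recursion level (where it is a no-op); B peels the leading digits with a single iterative loop and runs the body exactly once on the remainder.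
import Mathlib
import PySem

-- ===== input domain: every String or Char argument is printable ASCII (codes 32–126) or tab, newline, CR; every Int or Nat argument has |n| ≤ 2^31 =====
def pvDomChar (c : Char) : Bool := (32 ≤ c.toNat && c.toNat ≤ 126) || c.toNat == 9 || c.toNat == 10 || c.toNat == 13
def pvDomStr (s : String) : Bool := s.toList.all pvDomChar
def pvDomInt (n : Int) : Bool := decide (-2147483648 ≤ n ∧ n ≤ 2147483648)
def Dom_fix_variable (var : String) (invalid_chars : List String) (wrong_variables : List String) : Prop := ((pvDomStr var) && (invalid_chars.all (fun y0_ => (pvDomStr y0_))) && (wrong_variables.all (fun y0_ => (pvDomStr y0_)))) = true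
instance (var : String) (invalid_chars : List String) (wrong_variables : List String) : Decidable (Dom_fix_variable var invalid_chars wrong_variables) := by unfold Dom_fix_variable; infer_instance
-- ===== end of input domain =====

-- B replaces A's recursive peeling of leading digits by an iterative left-to-right strip loop,
-- then runs the brace-dance/invalid-char body exactly ONCE on the remainder (A re-runs it at every
-- recursion level, where it is a no-op); objective: simpler. Both A and B mutate the two list
-- arguments in Python by appending the same elements in the same order; the equivalence proved
-- here is about the returned triple.

-- ===== PORT A =====
def pvInvalidA : List Char := [' ', ',', '.', ':', ';', '!', '?', '/', '\\', '(', ')', '[', ']']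
def pvOpenTokA : List Char := "ᴛᴇᴍᴘᴏᴘᴇɴ".toList
def pvCloseTokA : List Char := "ᴛᴇᴍᴘᴄʟᴏsᴇ".toList

-- the body of fix_variable after the leading-digit branch: {{/}}→token, remove invalid chars
-- (recording them and var), restore the tokens
def pvBodyA (var new_var : List Char) (ic wv : List String) : List Char × List String × List String :=
  let nv1 := PySem.Chars.replace (PySem.Chars.replace new_var ['{','{'] pvOpenTokA) ['}','}'] pvCloseTokA
  let st := nv1.foldl (fun (st : List Char × List String × List String) ch =>
      if ch ∈ pvInvalidA then
        (PySem.Chars.replace st.1 [ch] [],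
         st.2.1 ++ [String.ofList [ch]],
         if String.ofList var ∈ st.2.2 then st.2.2 else st.2.2 ++ [String.ofList var])
      else st) (nv1, ic, wv)
  (PySem.Chars.replace (PySem.Chars.replace st.1 pvOpenTokA ['{','{']) pvCloseTokA ['}','}'], st.2.1, st.2.2)

def pvFixA : List Char → List String → List String → List Char × List String × List String
  | [], ic, wv => ([], ic, wv)
  | c :: rest, ic, wv =>
    if PySem.Chars.strIsdigit [c] then
      let r := pvFixA rest (ic ++ [String.ofList [c]]) wv
      pvBodyA (c :: rest) r.1 r.2.1 r.2.2
    else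
      pvBodyA (c :: rest) (c :: rest) ic wv

def fix_variable (var : String) (invalid_chars : List String) (wrong_variables : List String) : String × List String × List String :=
  if var.toList = [] then (var, invalid_chars, wrong_variables)
  else
    let r := pvFixA var.toList invalid_chars wrong_variables
    (String.ofList r.1, r.2.1, r.2.2)

-- ===== PORT B =====
def pvInvalidB : List Char := [' ', ',', '.', ':', ';', '!', '?', '/', '\\', '(', ')', '[', ']']
def pvOpenTokB : List Char := "ᴛᴇᴍᴘᴏᴘᴇɴ".toList
def pvCloseTokB : List Char := "ᴛᴇᴍᴘᴄʟᴏsᴇ".toList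

-- while var and var[0].isdigit(): record var[0], drop it
def pvStripB : List Char → List String → List Char × List String
  | [], ic => ([], ic)
  | c :: rest, ic =>
    if PySem.Chars.strIsdigit [c] then pvStripB rest (ic ++ [String.ofList [c]])
    else (c :: rest, ic)

-- for char in new_var: …  (iterates the snapshot, rebinding nv)
def pvLoopB (var : List Char) : List Char → List Char → List String → List String → List Char × List String × List String
  | [], nv, ic, wv => (nv, ic, wv)
  | ch :: cs, nv, ic, wv =>
    if ch ∈ pvInvalidB then
      pvLoopB var cs (PySem.Chars.replace nv [ch] [])
        (ic ++ [String.ofList [ch]])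
        (if String.ofList var ∈ wv then wv else wv ++ [String.ofList var])
    else pvLoopB var cs nv ic wv

def fix_variable_alt (var : String) (invalid_chars : List String) (wrong_variables : List String) : String × List String × List String :=
  if var.toList = [] then (var, invalid_chars, wrong_variables)
  else
    let p := pvStripB var.toList invalid_chars
    let nv0 := PySem.Chars.replace (PySem.Chars.replace p.1 ['{','{'] pvOpenTokB) ['}','}'] pvCloseTokB
    let r := pvLoopB p.1 nv0 nv0 p.2 wrong_variables
    (String.ofList (PySem.Chars.replace (PySem.Chars.replace r.1 pvOpenTokB ['{','{']) pvCloseTokB ['}','}']),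
     r.2.1, r.2.2)

-- ===== PRECONDITION & SPEC =====
def Spec_fix_variable (var : String) (invalid_chars : List String) (wrong_variables : List String) (out : String × List String × List String) : Prop := out = fix_variable_alt var invalid_chars wrong_variables
instance (var : String) (invalid_chars : List String) (wrong_variables : List String) (out : String × List String × List String) : Decidable (Spec_fix_variable var invalid_chars wrong_variables out) := by unfold Spec_fix_variable; infer_instance

-- ===== CLAIM (what is proved, stated in full; the proofs are below) =====
def Claim_equal_fix_variable : Prop := ∀ (var : String) (invalid_chars : List String) (wrong_variables : List String), Dom_fix_variable var invalid_chars wrong_variables → Spec_fix_variable var invalid_chars wrong_variables (fix_variable var invalid_chars wrong_variables)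

-- ===== LEMMAS AND PROOFS =====

-- ---- a structural characterization of PySem.Chars.replace for a nonempty pattern ----
def pvRep (old new : List Char) : List Char → List Char
  | [] => []
  | c :: t =>
    if old.isPrefixOf (c :: t) then new ++ pvRep old new (t.drop (old.length - 1))
    else c :: pvRep old new t
termination_by l => l.length
decreasing_by
  · simp only [List.length_drop, List.length_cons]; omega
  · simp only [List.length_cons]; omega

theorem pvGo_eq (old new : List Char) (hold : old ≠ []) :
    ∀ fuel l acc, l.length ≤ fuel →
      PySem.Chars.replace.go old new fuel l acc = acc.reverse ++ pvRep old new l := by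
  intro fuel
  induction fuel with
  | zero =>
    intro l acc hl
    cases l with
    | nil => simp [PySem.Chars.replace.go, pvRep]
    | cons c t => simp at hl
  | succ n ih =>
    intro l acc hl
    cases l with
    | nil => simp [PySem.Chars.replace.go, pvRep]
    | cons c t =>
      have htl : t.length ≤ n := by simp at hl; omega
      by_cases hp : old.isPrefixOf (c :: t)
      · rw [PySem.Chars.replace.go]
        simp only [hp, if_pos]
        have hdrop : (c :: t).drop old.length = t.drop (old.length - 1) := by
          cases old with
          | nil => exact absurd rfl hold
          | cons a o => simp
        rw [hdrop, ih _ _ ((by simp [List.length_drop] :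
              (t.drop (old.length - 1)).length ≤ t.length).trans htl)]
        rw [pvRep]
        simp [hp]
      · rw [PySem.Chars.replace.go]
        simp only [hp]
        rw [ih _ _ htl]
        rw [pvRep]
        simp [hp]

theorem pvReplace_eq (s old new : List Char) (hold : old ≠ []) :
    PySem.Chars.replace s old new = pvRep old new s := by
  rw [PySem.Chars.replace]
  have : old.isEmpty = false := by simp [hold]
  rw [this]
  simpa using pvGo_eq old new hold s.length s [] le_rfl

theorem pvRep_nomatch {old : List Char} (new : List Char) {c : Char} {z : List Char}
    (h : ¬ old.isPrefixOf (c :: z)) : pvRep old new (c :: z) = c :: pvRep old new z := by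
  rw [pvRep]; simp [h]

theorem pvRep_cons_hd {a : Char} {o' : List Char} (new : List Char) {c : Char} {z : List Char}
    (h : c ≠ a) : pvRep (a :: o') new (c :: z) = c :: pvRep (a :: o') new z := by
  apply pvRep_nomatch
  intro hp
  simp [List.isPrefixOf] at hp
  exact h hp.1.symm

theorem pvRep_match {a : Char} {o' : List Char} (new y : List Char) :
    pvRep (a :: o') new ((a :: o') ++ y) = new ++ pvRep (a :: o') new y := by
  have hp : (a :: o').isPrefixOf (a :: (o' ++ y)) := by
    simp [List.isPrefixOf_iff_prefix]
  simp only [List.cons_append]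
  rw [pvRep, if_pos hp]
  have hd : List.drop ((a :: o').length - 1) (o' ++ y) = y := by simp
  rw [hd]

theorem pvRep_prepend {a : Char} {o' : List Char} (new : List Char) {pre : List Char}
    (h : ∀ c ∈ pre, c ≠ a) : ∀ x, pvRep (a :: o') new (pre ++ x) = pre ++ pvRep (a :: o') new x := by
  induction pre with
  | nil => intro x; simp
  | cons d p ih =>
    intro x
    simp only [List.cons_append]
    rw [pvRep_cons_hd new (h d (by simp))]
    rw [ih (fun c hc => h c (by simp [hc]))]

theorem pvRep_single (c : Char) (s : List Char) :
    pvRep [c] [] s = s.filter (· ≠ c) := by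
  induction s with
  | nil => simp [pvRep]
  | cons d t ih =>
    by_cases hdc : d = c
    · subst hdc
      rw [pvRep]
      simp [List.isPrefixOf, ih]
    · rw [pvRep_cons_hd [] hdc, ih]
      simp [hdc]

-- ---- the brace dance as pvRep chains ----
def pvBR (m : List Char) : List Char :=
  pvRep ['}','}'] pvCloseTokA (pvRep ['{','{'] pvOpenTokA m)

def pvRS (x : List Char) : List Char :=
  pvRep pvCloseTokA ['}','}'] (pvRep pvOpenTokA ['{','{'] x)

def pvFilt (s : List Char) : List Char := s.filter (fun c => !(decide (c ∈ pvInvalidA)))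
def pvInvOf (s : List Char) : List Char := s.filter (fun c => decide (c ∈ pvInvalidA))
def pvAscii (s : List Char) : Bool := s.all pvDomChar

theorem pvOpenTok_eq : pvOpenTokA = ['ᴛ','ᴇ','ᴍ','ᴘ','ᴏ','ᴘ','ᴇ','ɴ'] := rfl
theorem pvCloseTok_eq : pvCloseTokA = ['ᴛ','ᴇ','ᴍ','ᴘ','ᴄ','ʟ','ᴏ','s','ᴇ'] := rfl

theorem pvRep_CC_openTok (x : List Char) :
    pvRep ['}','}'] pvCloseTokA (pvOpenTokA ++ x) = pvOpenTokA ++ pvRep ['}','}'] pvCloseTokA x := by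
  refine pvRep_prepend _ ?_ x
  rw [pvOpenTok_eq]
  intro c hc
  simp only [List.mem_cons, List.not_mem_nil, or_false] at hc
  rcases hc with h|h|h|h|h|h|h|h <;> subst h <;> decide

theorem pvBR_open (t : List Char) : pvBR ('{' :: '{' :: t) = pvOpenTokA ++ pvBR t := by
  unfold pvBR
  rw [show ('{' :: '{' :: t) = ['{','{'] ++ t from rfl, pvRep_match, pvRep_CC_openTok]

theorem pvRep_OO_head (t : List Char) :
    pvRep ['{','{'] pvOpenTokA ('}' :: t) = '}' :: pvRep ['{','{'] pvOpenTokA t :=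
  pvRep_cons_hd _ (by decide)

theorem pvBR_close (t : List Char) : pvBR ('}' :: '}' :: t) = pvCloseTokA ++ pvBR t := by
  unfold pvBR
  rw [pvRep_OO_head, pvRep_OO_head,
    show ('}' :: '}' :: pvRep ['{','{'] pvOpenTokA t) = ['}','}'] ++ pvRep ['{','{'] pvOpenTokA t from rfl,
    pvRep_match]

theorem pvRep_OO_hd_eq (t : List Char) (c : Char) :
    (pvRep ['{','{'] pvOpenTokA (c :: t)).head? = some c ∨
      (pvRep ['{','{'] pvOpenTokA (c :: t)).head? = some 'ᴛ' := by
  by_cases hp : (['{','{'] : List Char).isPrefixOf (c :: t)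
  · right
    have hc : c = '{' := by simp [List.isPrefixOf] at hp; exact hp.1.symm
    cases t with
    | nil => simp [List.isPrefixOf] at hp
    | cons d t' =>
      have hd : d = '{' := by simp [List.isPrefixOf] at hp; exact hp.2.symm
      subst hc; subst hd
      rw [show ('{' :: '{' :: t') = ['{','{'] ++ t' from rfl, pvRep_match]
      rw [pvOpenTok_eq]; rfl
  · left
    rw [pvRep_nomatch _ hp]
    rfl

theorem pvBR_cons {c : Char} {t : List Char}
    (h1 : ¬ (['{','{'] : List Char).isPrefixOf (c :: t))
    (h2 : ¬ (['}','}'] : List Char).isPrefixOf (c :: t)) :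
    pvBR (c :: t) = c :: pvBR t := by
  unfold pvBR
  rw [pvRep_nomatch _ h1]
  apply pvRep_nomatch
  intro hp
  -- from hp : ['}','}'] prefix of c :: pvRep OO T t, get c = '}' and head of rep = '}'
  have hc : c = '}' := by
    cases hq : pvRep ['{','{'] pvOpenTokA t with
    | nil => simp [hq, List.isPrefixOf] at hp
    | cons d z => simp [hq, List.isPrefixOf] at hp; exact hp.1.symm
  subst hc
  cases t with
  | nil => simp [pvRep, List.isPrefixOf] at hp
  | cons d t' =>
    have hd : d ≠ '}' := by
      intro hdd; subst hdd
      exact h2 (by simp [List.isPrefixOf])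
    rcases pvRep_OO_hd_eq t' d with hh | hh <;>
      (cases hq : pvRep ['{','{'] pvOpenTokA (d :: t') with
       | nil => rw [hq] at hh; simp at hh
       | cons e z =>
         rw [hq] at hh hp
         simp at hh
         simp [List.isPrefixOf] at hp
         first
           | (exact hd (by rw [hh] at hp; exact hp.symm))
           | (rw [hh] at hp; exact absurd hp (by decide)))

theorem pvRS_open (y : List Char) : pvRS (pvOpenTokA ++ y) = '{' :: '{' :: pvRS y := by
  unfold pvRS
  rw [pvOpenTok_eq, pvRep_match]
  rw [show ((['{','{'] : List Char) ++ pvRep ['ᴛ','ᴇ','ᴍ','ᴘ','ᴏ','ᴘ','ᴇ','ɴ'] ['{','{'] y)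
        = '{' :: '{' :: pvRep ['ᴛ','ᴇ','ᴍ','ᴘ','ᴏ','ᴘ','ᴇ','ɴ'] ['{','{'] y from rfl]
  rw [pvCloseTok_eq]
  rw [pvRep_cons_hd _ (by decide), pvRep_cons_hd _ (by decide)]

theorem pvRS_close (y : List Char) : pvRS (pvCloseTokA ++ y) = '}' :: '}' :: pvRS y := by
  unfold pvRS
  have h1 : pvRep pvOpenTokA ['{','{'] (pvCloseTokA ++ y) = pvCloseTokA ++ pvRep pvOpenTokA ['{','{'] y := by
    rw [pvOpenTok_eq, pvCloseTok_eq]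
    rw [show ((['ᴛ','ᴇ','ᴍ','ᴘ','ᴄ','ʟ','ᴏ','s','ᴇ'] : List Char) ++ y)
          = 'ᴛ' :: (['ᴇ','ᴍ','ᴘ','ᴄ','ʟ','ᴏ','s','ᴇ'] ++ y) from rfl]
    rw [pvRep_nomatch _ (by simp [List.isPrefixOf])]
    rw [pvRep_prepend _ (by
      intro c hc
      simp only [List.mem_cons, List.not_mem_nil, or_false] at hc
      rcases hc with h|h|h|h|h|h|h|h <;> subst h <;> decide) y]
    rfl
  rw [h1, pvCloseTok_eq, pvRep_match, ← pvCloseTok_eq]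
  rfl

theorem pvRS_cons {c : Char} (h : pvDomChar c = true) (y : List Char) :
    pvRS (c :: y) = c :: pvRS y := by
  have hc : c ≠ 'ᴛ' := by
    intro hh
    subst hh
    exact absurd h (by decide)
  unfold pvRS
  rw [pvOpenTok_eq, pvCloseTok_eq]
  rw [pvRep_cons_hd _ hc, pvRep_cons_hd _ hc]

theorem pvFilt_openTok (x : List Char) : pvFilt (pvOpenTokA ++ x) = pvOpenTokA ++ pvFilt x := by
  rw [pvFilt, List.filter_append]
  rfl

theorem pvFilt_closeTok (x : List Char) : pvFilt (pvCloseTokA ++ x) = pvCloseTokA ++ pvFilt x := by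
  rw [pvFilt, List.filter_append]
  rfl

theorem pvInvOf_openTok (x : List Char) : pvInvOf (pvOpenTokA ++ x) = pvInvOf x := by
  rw [pvInvOf, List.filter_append]
  rfl

theorem pvInvOf_closeTok (x : List Char) : pvInvOf (pvCloseTokA ++ x) = pvInvOf x := by
  rw [pvInvOf, List.filter_append]
  rfl

theorem pvFilt_keep {c : Char} (h : c ∉ pvInvalidA) (x : List Char) :
    pvFilt (c :: x) = c :: pvFilt x := by
  simp [pvFilt, h]

theorem pvFilt_drop {c : Char} (h : c ∈ pvInvalidA) (x : List Char) :
    pvFilt (c :: x) = pvFilt x := by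
  simp [pvFilt, h]

theorem pvInvOf_keep {c : Char} (h : c ∈ pvInvalidA) (x : List Char) :
    pvInvOf (c :: x) = c :: pvInvOf x := by
  simp [pvInvOf, h]

theorem pvInvOf_drop {c : Char} (h : c ∉ pvInvalidA) (x : List Char) :
    pvInvOf (c :: x) = pvInvOf x := by
  simp [pvInvOf, h]

theorem pvRep_nil (old new : List Char) : pvRep old new [] = [] := by
  rw [pvRep]

theorem pvMF_nil_filt : pvRS (pvFilt (pvBR [])) = pvFilt [] := by
  simp [pvBR, pvRS, pvFilt, pvRep_nil]

theorem pvMF_nil_inv : pvInvOf (pvBR []) = pvInvOf [] := by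
  simp [pvBR, pvInvOf, pvRep_nil]

theorem pvAscii_cons (c : Char) (x : List Char) :
    pvAscii (c :: x) = (pvDomChar c && pvAscii x) := by
  simp [pvAscii]

-- the round trip: on an ASCII string, token-replace + invalid-filter + token-restore = invalid-filter
theorem pvM_aux : ∀ n m, m.length ≤ n → pvAscii m = true → pvRS (pvFilt (pvBR m)) = pvFilt m := by
  intro n
  induction n with
  | zero =>
    intro m hm _
    have hmm : m = [] := List.length_eq_zero_iff.mp (by omega)
    subst hmm
    exact pvMF_nil_filt
  | succ n ih =>
    intro m hm ha
    cases m with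
    | nil => exact pvMF_nil_filt
    | cons c t =>
      by_cases h1 : (['{','{'] : List Char).isPrefixOf (c :: t)
      · cases t with
        | nil => simp [List.isPrefixOf] at h1
        | cons d t' =>
          simp [List.isPrefixOf] at h1
          obtain ⟨hc, hd⟩ := h1
          subst hc; subst hd
          rw [pvBR_open, pvFilt_openTok, pvRS_open,
            ih t' (by simp at hm; omega) (by simp [pvAscii_cons] at ha ⊢; tauto)]
          rw [pvFilt_keep (by decide), pvFilt_keep (by decide)]
      · by_cases h2 : (['}','}'] : List Char).isPrefixOf (c :: t)
        · cases t with
          | nil => simp [List.isPrefixOf] at h2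
          | cons d t' =>
            simp [List.isPrefixOf] at h2
            obtain ⟨hc, hd⟩ := h2
            subst hc; subst hd
            rw [pvBR_close, pvFilt_closeTok, pvRS_close,
              ih t' (by simp at hm; omega) (by simp [pvAscii_cons] at ha ⊢; tauto)]
            rw [pvFilt_keep (by decide), pvFilt_keep (by decide)]
        · have hat : pvAscii t = true := by simp [pvAscii_cons] at ha; tauto
          have hdc : pvDomChar c = true := by simp [pvAscii_cons] at ha; tauto
          have iht := ih t (by simp at hm; omega) hat
          rw [pvBR_cons h1 h2]
          by_cases hc : c ∈ pvInvalidA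
          · rw [pvFilt_drop hc, pvFilt_drop hc, iht]
          · rw [pvFilt_keep hc, pvFilt_keep hc, pvRS_cons hdc, iht]

theorem pvM (m : List Char) (hm : pvAscii m = true) :
    pvRS (pvFilt (pvBR m)) = pvFilt m :=
  pvM_aux m.length m le_rfl hm

theorem pvF_aux : ∀ n m, m.length ≤ n → pvInvOf (pvBR m) = pvInvOf m := by
  intro n
  induction n with
  | zero =>
    intro m hm
    have hmm : m = [] := List.length_eq_zero_iff.mp (by omega)
    subst hmm
    exact pvMF_nil_inv
  | succ n ih =>
    intro m hm
    cases m with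
    | nil => exact pvMF_nil_inv
    | cons c t =>
      by_cases h1 : (['{','{'] : List Char).isPrefixOf (c :: t)
      · cases t with
        | nil => simp [List.isPrefixOf] at h1
        | cons d t' =>
          simp [List.isPrefixOf] at h1
          obtain ⟨hc, hd⟩ := h1
          subst hc; subst hd
          rw [pvBR_open, pvInvOf_openTok, ih t' (by simp at hm; omega)]
          rw [pvInvOf_drop (by decide), pvInvOf_drop (by decide)]
      · by_cases h2 : (['}','}'] : List Char).isPrefixOf (c :: t)
        · cases t with
          | nil => simp [List.isPrefixOf] at h2
          | cons d t' =>
            simp [List.isPrefixOf] at h2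
            obtain ⟨hc, hd⟩ := h2
            subst hc; subst hd
            rw [pvBR_close, pvInvOf_closeTok, ih t' (by simp at hm; omega)]
            rw [pvInvOf_drop (by decide), pvInvOf_drop (by decide)]
        · have iht := ih t (by simp at hm; omega)
          rw [pvBR_cons h1 h2]
          by_cases hc : c ∈ pvInvalidA
          · rw [pvInvOf_keep hc, pvInvOf_keep hc, iht]
          · rw [pvInvOf_drop hc, pvInvOf_drop hc, iht]

theorem pvF (m : List Char) : pvInvOf (pvBR m) = pvInvOf m :=
  pvF_aux m.length m le_rfl

-- ---- the for-loop, characterized ----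
theorem pvFoldNv (s : List Char) :
    ∀ nv, s.foldl (fun (acc : List Char) ch => if ch ∈ pvInvalidA then acc.filter (· ≠ ch) else acc) nv
      = nv.filter (fun c => !(decide (c ∈ pvInvalidA) && decide (c ∈ s))) := by
  induction s with
  | nil => intro nv; simp
  | cons ch s' ih =>
    intro nv
    rw [List.foldl_cons]
    by_cases h : ch ∈ pvInvalidA
    · rw [if_pos h, ih, List.filter_filter]
      apply List.filter_congr
      intro c _
      by_cases hc : c = ch
      · subst hc; simp [h]
      · simp [hc]
    · rw [if_neg h, ih]
      apply List.filter_congr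
      intro c _
      by_cases hc : c = ch
      · subst hc; simp [h]
      · simp [hc]

theorem pvLoopA_char (var : List Char) (s : List Char) :
    ∀ nv ic wv,
      s.foldl (fun (st : List Char × List String × List String) ch =>
        if ch ∈ pvInvalidA then
          (PySem.Chars.replace st.1 [ch] [],
           st.2.1 ++ [String.ofList [ch]],
           if String.ofList var ∈ st.2.2 then st.2.2 else st.2.2 ++ [String.ofList var])
        else st) (nv, ic, wv)
      = (s.foldl (fun (acc : List Char) ch => if ch ∈ pvInvalidA then acc.filter (· ≠ ch) else acc) nv,
         ic ++ (pvInvOf s).map (fun ch => String.ofList [ch]),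
         if pvInvOf s = [] then wv
         else if String.ofList var ∈ wv then wv else wv ++ [String.ofList var]) := by
  induction s with
  | nil => intro nv ic wv; simp [pvInvOf]
  | cons ch s' ih =>
    intro nv ic wv
    rw [List.foldl_cons, List.foldl_cons]
    by_cases h : ch ∈ pvInvalidA
    · rw [if_pos h, if_pos h]
      have hrep : PySem.Chars.replace nv [ch] [] = nv.filter (· ≠ ch) := by
        rw [pvReplace_eq _ _ _ (by simp), pvRep_single]
      rw [hrep, ih]
      rw [pvInvOf_keep h]
      have hv : String.ofList var ∈ (if String.ofList var ∈ wv then wv else wv ++ [String.ofList var]) := by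
        by_cases hw : String.ofList var ∈ wv <;> simp [hw]
      by_cases hs : pvInvOf s' = [] <;> simp [hs, hv]
    · rw [if_neg h, if_neg h, ih, pvInvOf_drop h]

-- ---- the body, characterized ----
theorem pvBodyA_char (var m : List Char) (ic wv : List String) (hm : pvAscii m = true) :
    pvBodyA var m ic wv =
      (pvFilt m,
       ic ++ (pvInvOf m).map (fun ch => String.ofList [ch]),
       if pvInvOf m = [] then wv
       else if String.ofList var ∈ wv then wv else wv ++ [String.ofList var]) := by
  have hOO : (['{','{'] : List Char) ≠ [] := by simp
  have hCC : (['}','}'] : List Char) ≠ [] := by simp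
  have hT : pvOpenTokA ≠ [] := by rw [pvOpenTok_eq]; simp
  have hK : pvCloseTokA ≠ [] := by rw [pvCloseTok_eq]; simp
  have hkey : pvBodyA var m ic wv =
      (let nv1 := PySem.Chars.replace (PySem.Chars.replace m ['{','{'] pvOpenTokA) ['}','}'] pvCloseTokA
       let st := nv1.foldl (fun (st : List Char × List String × List String) ch =>
          if ch ∈ pvInvalidA then
            (PySem.Chars.replace st.1 [ch] [],
             st.2.1 ++ [String.ofList [ch]],
             if String.ofList var ∈ st.2.2 then st.2.2 else st.2.2 ++ [String.ofList var])
          else st) (nv1, ic, wv)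
       (PySem.Chars.replace (PySem.Chars.replace st.1 pvOpenTokA ['{','{']) pvCloseTokA ['}','}'], st.2.1, st.2.2)) := rfl
  rw [hkey]
  simp only []
  rw [pvReplace_eq _ _ _ hOO, pvReplace_eq _ _ _ hCC]
  have hbr : pvRep ['}','}'] pvCloseTokA (pvRep ['{','{'] pvOpenTokA m) = pvBR m := rfl
  rw [hbr, pvLoopA_char var (pvBR m), pvFoldNv]
  have hfilt : (pvBR m).filter (fun c => !(decide (c ∈ pvInvalidA) && decide (c ∈ pvBR m)))
      = pvFilt (pvBR m) := by
    apply List.filter_congr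
    intro c hc
    simp [hc]
  rw [hfilt, pvReplace_eq _ _ _ hT, pvReplace_eq _ _ _ hK]
  have hrs : pvRep pvCloseTokA ['}','}'] (pvRep pvOpenTokA ['{','{'] (pvFilt (pvBR m))) = pvRS (pvFilt (pvBR m)) := rfl
  rw [hrs, pvM m hm, pvF m]

theorem pvBodyA_noop (var m : List Char) (ic wv : List String)
    (hm : pvAscii m = true) (hno : pvInvOf m = []) :
    pvBodyA var m ic wv = (m, ic, wv) := by
  rw [pvBodyA_char var m ic wv hm, hno]
  have : pvFilt m = m := by
    apply List.filter_eq_self.mpr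
    intro c hc
    have : ¬ (c ∈ pvInvalidA) := by
      intro hmem
      have : c ∈ pvInvOf m := by simp [pvInvOf, hc, hmem]
      rw [hno] at this
      simp at this
    simp [this]
  simp [this]

theorem pvStripB_ascii (l : List Char) (hl : pvAscii l = true) :
    ∀ ic, pvAscii (pvStripB l ic).1 = true := by
  induction l with
  | nil => intro ic; rfl
  | cons c rest ih =>
    intro ic
    rw [pvStripB]
    by_cases hd : PySem.Chars.strIsdigit [c] = true
    · simp only [hd, if_pos]
      exact ih (by rw [pvAscii_cons] at hl; exact ((Bool.and_eq_true _ _).mp hl).2) _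
    · simp only [hd]
      simpa using hl

theorem pvFilt_ascii (m : List Char) (hm : pvAscii m = true) : pvAscii (pvFilt m) = true := by
  rw [pvAscii, List.all_eq_true] at hm ⊢
  intro c hc
  exact hm c (List.mem_of_mem_filter hc)

theorem pvInvOf_filt (m : List Char) : pvInvOf (pvFilt m) = [] := by
  rw [pvInvOf, pvFilt, List.filter_filter, List.filter_eq_nil_iff]
  intro c _
  by_cases h : c ∈ pvInvalidA <;> simp [h]

-- ---- A = strip + one body ----
theorem pvFixA_eq : ∀ (l : List Char), pvAscii l = true →
    ∀ ic wv, pvFixA l ic wv = pvBodyA (pvStripB l ic).1 (pvStripB l ic).1 (pvStripB l ic).2 wv := by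
  intro l
  induction l with
  | nil =>
    intro _ ic wv
    rw [show pvStripB [] ic = ([], ic) from rfl]
    rw [pvBodyA_noop _ _ _ _ rfl rfl]
    rfl
  | cons c rest ih =>
    intro ha ic wv
    have harest : pvAscii rest = true := by
      rw [pvAscii_cons] at ha
      exact ((Bool.and_eq_true _ _).mp ha).2
    by_cases hd : PySem.Chars.strIsdigit [c] = true
    · have hstrip : pvStripB (c :: rest) ic = pvStripB rest (ic ++ [String.ofList [c]]) := by
        rw [pvStripB, if_pos hd]
      rw [pvFixA, if_pos hd, hstrip]
      set p := pvStripB rest (ic ++ [String.ofList [c]]) with hp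
      have hpa : pvAscii p.1 = true := pvStripB_ascii rest harest _
      rw [ih harest]
      rw [pvBodyA_char p.1 p.1 p.2 wv hpa]
      rw [pvBodyA_noop _ _ _ _ (pvFilt_ascii _ hpa) (pvInvOf_filt _)]
    · rw [pvFixA, if_neg hd]
      rw [show pvStripB (c :: rest) ic = (c :: rest, ic) from by rw [pvStripB, if_neg hd]]

-- ---- B's loop is A's fold ----
theorem pvLoopB_eq (var : List Char) (s : List Char) :
    ∀ nv ic wv,
      pvLoopB var s nv ic wv
      = s.foldl (fun (st : List Char × List String × List String) ch =>
        if ch ∈ pvInvalidA then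
          (PySem.Chars.replace st.1 [ch] [],
           st.2.1 ++ [String.ofList [ch]],
           if String.ofList var ∈ st.2.2 then st.2.2 else st.2.2 ++ [String.ofList var])
        else st) (nv, ic, wv) := by
  induction s with
  | nil => intro nv ic wv; rfl
  | cons ch cs ih =>
    intro nv ic wv
    rw [pvLoopB, List.foldl_cons]
    rw [show pvInvalidB = pvInvalidA from rfl]
    by_cases h : ch ∈ pvInvalidA
    · rw [if_pos h, if_pos h, ih]
    · rw [if_neg h, if_neg h, ih]

-- ===== VERDICT (by name: the statement is the Claim_ definition above) =====
theorem fix_variable_spec : Claim_equal_fix_variable := by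
  intro var ic wv hdom
  unfold Spec_fix_variable
  have hascii : pvAscii var.toList = true := by
    unfold Dom_fix_variable at hdom
    simp only [Bool.and_eq_true] at hdom
    exact hdom.1.1
  by_cases h : var.toList = []
  · simp [fix_variable, fix_variable_alt, h]
  · rw [fix_variable, fix_variable_alt, if_neg h, if_neg h]
    have hB : (let p := pvStripB var.toList ic
               let nv0 := PySem.Chars.replace (PySem.Chars.replace p.1 ['{','{'] pvOpenTokB) ['}','}'] pvCloseTokB
               let r := pvLoopB p.1 nv0 nv0 p.2 wv
               (String.ofList (PySem.Chars.replace (PySem.Chars.replace r.1 pvOpenTokB ['{','{']) pvCloseTokB ['}','}']),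
                r.2.1, r.2.2))
        = (let b := pvBodyA (pvStripB var.toList ic).1 (pvStripB var.toList ic).1 (pvStripB var.toList ic).2 wv
           (String.ofList b.1, b.2.1, b.2.2)) := by
      simp only []
      rw [pvLoopB_eq]
      rfl
    rw [hB]
    simp only []
    rw [pvFixA_eq var.toList hascii ic wv]
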